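-- pv_equiv track=rewrite | github.com/ccgeonhee/coding_exercise | LeetCode5.py | solution
-- ===== SOURCE A (Python) =====
-- def solution(s: str)->str:
--     result = []
--     for i in range(0, len(s)-1):
--         for j in range(i+1, len(s)+1):
--             text = s[i:j]
--             if len(text) < 2:
--                 continue
--             if text == text[::-1]:
--                 result.append(text)
--
--     result = sorted(result, key=lambda x:len(x))[0]
--     return result
-- ===== SOURCE B (Python) =====
-- def solution(s: str) -> str:
--     # The shortest palindromic substring (length >= 2) has length 2 or 3:
--     # return the earliest adjacent equal pair, else the earliest gap-2 pair.
--     for i in range(len(s) - 1):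
--         if s[i] == s[i + 1]:
--             return s[i:i + 2]
--     for i in range(len(s) - 2):
--         if s[i] == s[i + 2]:
--             return s[i:i + 3]
--     raise ValueError("no palindromic substring of length >= 2")
-- ===== Notes on version B (the rewrite author's own statement) =====
-- stated objective: faster
-- what changed: B replaces A's enumeration of all O(n^2) substrings with palindrome checks plus a stable sort by length by two linear scans: the shortest palindromic substring must have length 2 or 3, so B returns the earliest adjacent equal pair, else the earliest s[i]==s[i+2] triple.
import Mathlib
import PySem

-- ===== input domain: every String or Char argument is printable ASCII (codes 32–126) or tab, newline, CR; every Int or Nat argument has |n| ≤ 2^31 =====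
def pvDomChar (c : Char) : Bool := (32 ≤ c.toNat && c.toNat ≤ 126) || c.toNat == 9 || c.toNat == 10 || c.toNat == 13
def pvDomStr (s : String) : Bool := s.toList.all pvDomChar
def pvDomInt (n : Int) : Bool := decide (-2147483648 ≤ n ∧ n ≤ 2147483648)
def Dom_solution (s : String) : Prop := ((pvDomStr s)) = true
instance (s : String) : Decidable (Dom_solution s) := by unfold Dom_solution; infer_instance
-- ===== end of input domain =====

-- B replaces A's enumeration of all substrings + stable sort by length with two linear scans
-- (the shortest palindromic substring has length 2 or 3); objective: faster (asymptotic).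

-- ===== PORT A =====
-- faithful port of Source A: collect every palindromic substring of length ≥ 2 (i ascending, j
-- ascending), stable-sort by length, take element 0 (Python raises IndexError on the empty
-- list — those inputs are excluded by Pre_solution, the port returns "" there).
def solution (s : String) : String :=
  let cs := s.toList
  let n : Int := (cs.length : Int)
  let result : List (List Char) :=
    (PySem.List.pyRange 0 (n - 1) 1).foldl (fun res i =>
      (PySem.List.pyRange (i + 1) (n + 1) 1).foldl (fun res j =>
        let text := PySem.List.slice cs (some i) (some j)
        if text.length < 2 then res
        else if text = (PySem.List.slice? text none none (-1)).getD [] then res ++ [text]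
        else res) res) []
  match PySem.List.pyGet? (PySem.List.sorted result (fun x => x.length)) 0 with
  | some t => String.ofList t
  | none => ""

-- ===== PORT B =====
-- port of Source B: first scan for an adjacent equal pair (returns s[i:i+2]), then for an
-- s[i] == s[i+2] pair (returns s[i:i+3]); each index loop with early return becomes the
-- obvious structural recursion over the character list. Where Source B raises ValueError
-- (no palindromic substring of length ≥ 2 — outside Pre_solution) the port returns "".
def pvScanAdj : List Char → Option (List Char)
  | a :: b :: t => if a = b then some [a, b] else pvScanAdj (b :: t)
  | _ => none

def pvScanGap : List Char → Option (List Char)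
  | a :: b :: c :: t => if a = c then some [a, b, c] else pvScanGap (b :: c :: t)
  | _ => none

def solution_alt (s : String) : String :=
  match pvScanAdj s.toList with
  | some t => String.ofList t
  | none =>
    match pvScanGap s.toList with
    | some t => String.ofList t
    | none => ""

-- ===== PRECONDITION & SPEC =====
-- Pre_ excludes exactly the strings with no palindromic substring of length ≥ 2
-- (equivalently: no adjacent equal pair and no gap-2 equal pair), on which A raises
-- IndexError (indexing the empty result list) and B raises ValueError.
def Pre_solution (s : String) : Prop :=
  ∃ i < s.toList.length,
    (i + 2 ≤ s.toList.length ∧ s.toList[i]? = s.toList[i + 1]?) ∨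
    (i + 3 ≤ s.toList.length ∧ s.toList[i]? = s.toList[i + 2]?)
instance (s : String) : Decidable (Pre_solution s) := by unfold Pre_solution; infer_instance

def pvWitness_solution : String := "aba"

def Spec_solution (s : String) (out : String) : Prop := out = solution_alt s
instance (s : String) (out : String) : Decidable (Spec_solution s out) := by unfold Spec_solution; infer_instance

-- ===== CLAIM (what is proved, stated in full; the proofs are below) =====
def Claim_equal_solution : Prop := ∀ (s : String), Dom_solution s → Pre_solution s → Spec_solution s (solution s)

-- ===== LEMMAS AND PROOFS =====

-- A's inner-loop condition, block of palindromic slices starting at i, and the whole result list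
def pvCond (l : List Char) (i j : Int) : Bool :=
  !decide ((PySem.List.slice l (some i) (some j)).length < 2) &&
    decide (PySem.List.slice l (some i) (some j) = (PySem.List.slice l (some i) (some j)).reverse)

def pvTail (l : List Char) (i lo : Int) : List (List Char) :=
  ((PySem.List.pyRange lo ((l.length : Int) + 1) 1).filter (pvCond l i)).map
    (fun j => PySem.List.slice l (some i) (some j))

def pvBlock (l : List Char) (i : Int) : List (List Char) := pvTail l i (i + 1)

def pvResult (l : List Char) : List (List Char) :=
  (PySem.List.pyRange 0 ((l.length : Int) - 1) 1).flatMap (pvBlock l)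

-- first element of minimal key (strict improvements only), = head of the stable sort
def pvStep {α : Type} (key : α → Nat) (h : Option α) (x : α) : Option α :=
  match h with
  | none => some x
  | some m => if key x < key m then some x else some m

def pvFirstMin {α : Type} (key : α → Nat) (xs : List α) : Option α := xs.foldl (pvStep key) none

lemma pvPyGet_zero {α : Type} (xs : List α) : PySem.List.pyGet? xs 0 = xs.head? := by
  cases xs <;> simp [PySem.List.pyGet?, PySem.List.pyIdx?]

lemma pvInsertBy_head {α : Type} (b : α → α → Bool) (x : α) (acc : List α) :
    (PySem.List.insertBy b x acc).head? =
      some (match acc with | [] => x | y :: _ => if b x y then x else y) := by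
  cases acc with
  | nil => simp [PySem.List.insertBy]
  | cons y ys => by_cases h : b x y <;> simp [PySem.List.insertBy, h]

lemma pvSorted_head_aux {α : Type} (key : α → Nat) (xs : List α) : ∀ acc : List α,
    (xs.foldl (fun acc x => PySem.List.insertBy (fun a b => decide (key a < key b)) x acc) acc).head?
      = xs.foldl (pvStep key) acc.head? := by
  induction xs with
  | nil => intro acc; rfl
  | cons x xs ih =>
    intro acc
    rw [List.foldl_cons, List.foldl_cons, ih]
    congr 1
    rw [pvInsertBy_head]
    cases acc with
    | nil => rfl
    | cons y ys =>
      simp only [pvStep, List.head?_cons]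
      by_cases h : key x < key y <;> simp [h]

lemma pvSorted_head {α : Type} (key : α → Nat) (xs : List α) :
    (PySem.List.sorted xs key).head? = pvFirstMin key xs := by
  rw [PySem.List.sorted_eq_foldl_insertBy, pvSorted_head_aux]
  rfl

lemma pvFoldl_step_cases {α : Type} (key : α → Nat) (p : List α) :
    ∀ h : Option α, p.foldl (pvStep key) h = h ∨ ∃ m ∈ p, p.foldl (pvStep key) h = some m := by
  induction p with
  | nil => intro h; exact Or.inl rfl
  | cons x p ih =>
    intro h
    rw [List.foldl_cons]
    rcases ih (pvStep key h x) with hc | ⟨m, hm, hc⟩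
    · cases h with
      | none => exact Or.inr ⟨x, by simp, by simpa [pvStep] using hc⟩
      | some m =>
        by_cases hk : key x < key m
        · exact Or.inr ⟨x, by simp, by simpa [pvStep, hk] using hc⟩
        · exact Or.inl (by simpa [pvStep, hk] using hc)
    · exact Or.inr ⟨m, by simp [hm], hc⟩

lemma pvFoldl_step_stay {α : Type} (key : α → Nat) (x : α) (q : List α)
    (hq : ∀ y ∈ q, key x ≤ key y) : q.foldl (pvStep key) (some x) = some x := by
  induction q with
  | nil => rfl
  | cons y q ih =>
    rw [List.foldl_cons]
    have h1 : ¬ (key y < key x) := not_lt.mpr (hq y (by simp))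
    simp only [pvStep, h1, if_false]
    exact ih (fun z hz => hq z (by simp [hz]))

lemma pvFirstMin_decomp {α : Type} (key : α → Nat) (p : List α) (x : α) (q : List α)
    (hp : ∀ y ∈ p, key x < key y) (hq : ∀ y ∈ q, key x ≤ key y) :
    pvFirstMin key (p ++ x :: q) = some x := by
  unfold pvFirstMin
  rw [List.foldl_append, List.foldl_cons]
  have hx : p.foldl (pvStep key) none |>.elim True (fun m => key x < key m) := by
    rcases pvFoldl_step_cases key p none with hc | ⟨m, hm, hc⟩
    · simp [hc]
    · simp [hc]; exact hp m hm
  rcases pvFoldl_step_cases key p none with hc | ⟨m, hm, hc⟩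
  · rw [hc]; exact pvFoldl_step_stay key x q hq
  · rw [hc]
    have hk : key x < key m := hp m hm
    simp only [pvStep, hk, if_true]
    exact pvFoldl_step_stay key x q hq

-- slices of length 2 and 3
lemma pvTake_drop_two {l : List Char} {a : Nat} (h : a + 1 < l.length) :
    (l.drop a).take 2 = [l[a], l[a + 1]] := by
  rw [List.drop_eq_getElem_cons (by omega), List.drop_eq_getElem_cons h]
  rfl

lemma pvTake_drop_three {l : List Char} {a : Nat} (h : a + 2 < l.length) :
    (l.drop a).take 3 = [l[a], l[a + 1], l[a + 2]] := by
  rw [List.drop_eq_getElem_cons (by omega), List.drop_eq_getElem_cons (by omega),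
    List.drop_eq_getElem_cons h]
  rfl

-- every element of a tail of a block: a palindromic slice of length ≥ max 2 (lo - i)
lemma pvMem_tail {l : List Char} {i : Int} {c : Nat} {y : List Char} (hi : 0 ≤ i)
    (h : y ∈ pvTail l i (i + (c : Int))) :
    2 ≤ y.length ∧ y = y.reverse ∧
      ∃ b : Nat, i.toNat + c ≤ b ∧ b ≤ l.length ∧
        y = (l.drop i.toNat).take (b - i.toNat) ∧ y.length = b - i.toNat := by
  unfold pvTail at h
  simp only [List.mem_map, List.mem_filter, PySem.List.mem_pyRange_one] at h
  obtain ⟨j, ⟨⟨hj1, hj2⟩, hcond⟩, hy⟩ := h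
  have hj0 : 0 ≤ j := by omega
  have hia : i = (i.toNat : Int) := (Int.toNat_of_nonneg hi).symm
  have hja : j = (j.toNat : Int) := (Int.toNat_of_nonneg hj0).symm
  rw [hia, hja, PySem.List.slice_natCast] at hy
  have hab : i.toNat + c ≤ j.toNat := by omega
  have hbn : j.toNat ≤ l.length := by omega
  have hlen : y.length = j.toNat - i.toNat := by
    rw [← hy]
    simp only [List.length_take, List.length_drop]
    omega
  simp only [pvCond, Bool.and_eq_true, Bool.not_eq_eq_eq_not, Bool.not_true,
    decide_eq_false_iff_not, decide_eq_true_eq, not_lt] at hcond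
  rw [hia, hja, PySem.List.slice_natCast, hy] at hcond
  obtain ⟨hc1, hc2⟩ := hcond
  exact ⟨by omega, hc2, j.toNat, hab, hbn, hy.symm, hlen⟩

-- a palindromic slice of length 2 is an adjacent equal pair; of length 3, a gap-2 pair
lemma pvPal_two {l : List Char} {a : Nat} {y : List Char} (hrev : y = y.reverse)
    (hy : y = (l.drop a).take 2) (hlen : a + 2 ≤ l.length) : l[a]? = l[a + 1]? := by
  have h1 : a + 1 < l.length := by omega
  rw [pvTake_drop_two h1] at hy
  rw [hy] at hrev
  simp at hrev
  rw [List.getElem?_eq_getElem (by omega), List.getElem?_eq_getElem h1, hrev.1]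

lemma pvPal_three {l : List Char} {a : Nat} {y : List Char} (hrev : y = y.reverse)
    (hy : y = (l.drop a).take 3) (hlen : a + 3 ≤ l.length) : l[a]? = l[a + 2]? := by
  have h1 : a + 2 < l.length := by omega
  rw [pvTake_drop_three h1] at hy
  rw [hy] at hrev
  simp at hrev
  rw [List.getElem?_eq_getElem (by omega), List.getElem?_eq_getElem h1, hrev.1]

-- scan specifications
lemma pvScanAdj_some {l t : List Char} (h : pvScanAdj l = some t) :
    ∃ k : Nat, k + 1 < l.length ∧ l[k]? = l[k + 1]? ∧ t = (l.drop k).take 2 ∧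
      ∀ m : Nat, m < k → l[m]? ≠ l[m + 1]? := by
  induction l using pvScanAdj.induct with
  | case1 b tl =>
    refine ⟨0, by simp, by simp, ?_, by omega⟩
    simp [pvScanAdj] at h
    simp [← h]
  | case2 a b tl hne ih =>
    rw [pvScanAdj, if_neg hne] at h
    obtain ⟨k, hk, he, ht, hmin⟩ := ih h
    refine ⟨k + 1, by simpa using hk, by simpa using he, by simpa using ht, ?_⟩
    intro m hm
    cases m with
    | zero => simpa using hne
    | succ m => simpa using hmin m (by omega)
  | case3 tl hne =>
    exfalso
    match tl, hne with
    | [], _ => simp [pvScanAdj] at h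
    | [a], _ => simp [pvScanAdj] at h
    | a :: b :: t, hne => exact hne a b t rfl

lemma pvScanAdj_none {l : List Char} (h : pvScanAdj l = none) :
    ∀ k : Nat, k + 1 < l.length → l[k]? ≠ l[k + 1]? := by
  induction l using pvScanAdj.induct with
  | case1 b tl => simp [pvScanAdj] at h
  | case2 a b tl hne ih =>
    rw [pvScanAdj, if_neg hne] at h
    intro k hk
    cases k with
    | zero => simpa using hne
    | succ k => simpa using ih h k (by simpa using hk)
  | case3 tl hne =>
    intro k hk
    match tl, hne, hk with
    | [], _, hk => simp at hk
    | [a], _, hk => simp at hk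
    | a :: b :: t, hne, _ => exact absurd rfl (by intro he; exact hne a b t he)

lemma pvScanGap_some {l t : List Char} (h : pvScanGap l = some t) :
    ∃ k : Nat, k + 2 < l.length ∧ l[k]? = l[k + 2]? ∧ t = (l.drop k).take 3 ∧
      ∀ m : Nat, m < k → l[m]? ≠ l[m + 2]? := by
  induction l using pvScanGap.induct with
  | case1 b c tl =>
    refine ⟨0, by simp, by simp, ?_, by omega⟩
    simp [pvScanGap] at h
    simp [← h]
  | case2 a b c tl hne ih =>
    rw [pvScanGap, if_neg hne] at h
    obtain ⟨k, hk, he, ht, hmin⟩ := ih h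
    refine ⟨k + 1, by simpa using hk, by simpa using he, by simpa using ht, ?_⟩
    intro m hm
    cases m with
    | zero => simpa using hne
    | succ m => simpa using hmin m (by omega)
  | case3 tl hne =>
    exfalso
    match tl, hne with
    | [], _ => simp [pvScanGap] at h
    | [a], _ => simp [pvScanGap] at h
    | [a, b], _ => simp [pvScanGap] at h
    | a :: b :: c :: t, hne => exact hne a b c t rfl

lemma pvScanGap_none {l : List Char} (h : pvScanGap l = none) :
    ∀ k : Nat, k + 2 < l.length → l[k]? ≠ l[k + 2]? := by
  induction l using pvScanGap.induct with
  | case1 b c tl => simp [pvScanGap] at h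
  | case2 a b c tl hne ih =>
    rw [pvScanGap, if_neg hne] at h
    intro k hk
    cases k with
    | zero => simpa using hne
    | succ k => simpa using ih h k (by simpa using hk)
  | case3 tl hne =>
    intro k hk
    match tl, hne, hk with
    | [], _, hk => simp at hk
    | [a], _, hk => simp at hk
    | [a, b], _, hk => simp at hk
    | a :: b :: c :: t, hne, _ => exact absurd (hne a b c t rfl) not_false

-- A's double fold builds pvResult
lemma pvSolution_eq (s : String) :
    solution s = match PySem.List.pyGet?
        (PySem.List.sorted (pvResult s.toList) (fun x => x.length)) 0 with
      | some t => String.ofList t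
      | none => "" := by
  have hfun : ∀ i : Int, (fun (res : List (List Char)) (j : Int) =>
      let text := PySem.List.slice s.toList (some i) (some j)
      if text.length < 2 then res
      else if text = (PySem.List.slice? text none none (-1)).getD [] then res ++ [text]
      else res)
      = fun res j => if pvCond s.toList i j then
          res ++ [PySem.List.slice s.toList (some i) (some j)] else res := by
    intro i
    funext res j
    simp only [PySem.List.slice?_none_none_neg_one, Option.getD_some]
    by_cases h1 : (PySem.List.slice s.toList (some i) (some j)).length < 2
    · rw [if_pos h1, if_neg (by simp [pvCond, h1])]
    · rw [if_neg h1]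
      by_cases h2 : PySem.List.slice s.toList (some i) (some j)
          = (PySem.List.slice s.toList (some i) (some j)).reverse
      · rw [if_pos h2, if_pos (by
          simp only [pvCond, Bool.and_eq_true, Bool.not_eq_eq_eq_not, Bool.not_true,
            decide_eq_false_iff_not, decide_eq_true_eq]
          exact ⟨h1, h2⟩)]
      · rw [if_neg h2, if_neg (by
          simp only [pvCond, Bool.and_eq_true, Bool.not_eq_eq_eq_not, Bool.not_true,
            decide_eq_false_iff_not, decide_eq_true_eq]
          tauto)]
  have hout : (fun (res : List (List Char)) (i : Int) =>
      (PySem.List.pyRange (i + 1) ((s.toList.length : Int) + 1) 1).foldl (fun res j =>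
        let text := PySem.List.slice s.toList (some i) (some j)
        if text.length < 2 then res
        else if text = (PySem.List.slice? text none none (-1)).getD [] then res ++ [text]
        else res) res) = fun res i => res ++ pvBlock s.toList i := by
    funext res i
    rw [hfun i, PySem.List.foldl_append_if]
    rfl
  show (match PySem.List.pyGet? (PySem.List.sorted
      ((PySem.List.pyRange 0 ((s.toList.length : Int) - 1) 1).foldl
        (fun res i =>
          (PySem.List.pyRange (i + 1) ((s.toList.length : Int) + 1) 1).foldl (fun res j =>
            let text := PySem.List.slice s.toList (some i) (some j)
            if text.length < 2 then res
            else if text = (PySem.List.slice? text none none (-1)).getD [] then res ++ [text]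
            else res) res) []) (fun x => x.length)) 0 with
    | some t => String.ofList t
    | none => "") = _
  rw [hout, PySem.List.foldl_append_eq_flatMap]
  rfl

-- every element of a flatMap of blocks over [lo, hi) is a palindromic slice of length ≥ 2
lemma pvMem_flatMap {l : List Char} {lo hi : Int} (hlo : 0 ≤ lo) {y : List Char}
    (h : y ∈ (PySem.List.pyRange lo hi 1).flatMap (pvBlock l)) :
    ∃ a b : Nat, lo ≤ (a : Int) ∧ (a : Int) < hi ∧ a + 1 ≤ b ∧ b ≤ l.length ∧
      y = (l.drop a).take (b - a) ∧ y.length = b - a ∧ 2 ≤ y.length ∧ y = y.reverse := by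
  simp only [List.mem_flatMap, PySem.List.mem_pyRange_one] at h
  obtain ⟨i, ⟨hi1, hi2⟩, hmem⟩ := h
  have hi0 : 0 ≤ i := le_trans hlo hi1
  have hmt := pvMem_tail (c := 1) hi0 (by unfold pvBlock at hmem; push_cast; exact hmem)
  obtain ⟨h2, hrev, b, hab, hbn, hshape, hlen⟩ := hmt
  refine ⟨i.toNat, b, ?_, ?_, hab, hbn, hshape, by omega, h2, hrev⟩
  · omega
  · omega

-- the main list-level lemmas
lemma pvMain_adj {l t : List Char} (h : pvScanAdj l = some t) :
    (PySem.List.sorted (pvResult l) (fun x => x.length)).head? = some t := by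
  obtain ⟨k, hk, he, ht, hmin⟩ := pvScanAdj_some h
  have hk1 : k < l.length := by omega
  have hk2 : k + 1 < l.length := hk
  have heq : l[k] = l[k + 1] := by
    rw [List.getElem?_eq_getElem hk1, List.getElem?_eq_getElem hk2] at he
    exact Option.some.inj he
  have htlen : t.length = 2 := by
    rw [ht]
    simp only [List.length_take, List.length_drop]
    omega
  -- split the outer range at i = k
  have hsplit : pvResult l = (PySem.List.pyRange 0 (k : Int) 1).flatMap (pvBlock l) ++
      (pvBlock l (k : Int) ++
        (PySem.List.pyRange ((k : Int) + 1) ((l.length : Int) - 1) 1).flatMap (pvBlock l)) := by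
    unfold pvResult
    rw [PySem.List.pyRange_one_append 0 (k : Int) ((l.length : Int) - 1) (by omega) (by omega),
      PySem.List.pyRange_one_cons (by omega : (k : Int) < (l.length : Int) - 1)]
    simp [List.flatMap_append]
  -- the block at k starts with t
  have hc1 : pvCond l (k : Int) ((k : Int) + 1) = false := by
    have hs : PySem.List.slice l (some (k : Int)) (some ((k : Int) + 1)) = (l.drop k).take 1 := by
      have := PySem.List.slice_natCast_add l k 1
      push_cast at this
      exact this
    simp only [pvCond, hs, List.length_take, List.length_drop, Bool.and_eq_false_iff]
    left
    simp only [Bool.not_eq_eq_eq_not, Bool.not_false, decide_eq_true_eq]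
    omega
  have hslice2 : PySem.List.slice l (some (k : Int)) (some ((k : Int) + 2)) = (l.drop k).take 2 := by
    have := PySem.List.slice_natCast_add l k 2
    push_cast at this
    exact this
  have htake2 : (l.drop k).take 2 = [l[k], l[k + 1]] := pvTake_drop_two hk2
  have hc2 : pvCond l (k : Int) ((k : Int) + 2) = true := by
    simp only [pvCond, hslice2, htake2, Bool.and_eq_true, Bool.not_eq_eq_eq_not, Bool.not_true,
      decide_eq_false_iff_not, decide_eq_true_eq]
    constructor
    · simp
    · simp [heq]
  have hblock : pvBlock l (k : Int) = t :: pvTail l (k : Int) ((k : Int) + 3) := by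
    unfold pvBlock pvTail
    rw [PySem.List.pyRange_one_cons (by omega : (k : Int) + 1 < (l.length : Int) + 1)]
    rw [show (k : Int) + 1 + 1 = (k : Int) + 2 by ring]
    rw [PySem.List.pyRange_one_cons (by omega : (k : Int) + 2 < (l.length : Int) + 1)]
    rw [show (k : Int) + 2 + 1 = (k : Int) + 3 by ring]
    simp only [List.filter_cons, hc1, hc2]
    simp [hslice2, ← ht]
  rw [pvSorted_head, hsplit, hblock]
  simp only [List.cons_append]
  apply pvFirstMin_decomp
  · -- every palindromic slice starting before k is longer than 2
    intro y hy
    obtain ⟨a, b, _, hak, hab, hbn, hshape, hlen, h2, hrev⟩ := pvMem_flatMap le_rfl hy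
    rw [htlen]
    rcases Nat.lt_or_ge 2 y.length with hgt | hle
    · exact hgt
    · exfalso
      have h2' : y.length = 2 := by omega
      have hb2 : b = a + 2 := by omega
      have hpa : l[a]? = l[a + 1]? := pvPal_two hrev (by rw [hshape, hb2]; simp) (by omega)
      exact hmin a (by omega) hpa
  · -- everything else has length ≥ 2
    intro y hy
    rw [htlen]
    rcases List.mem_append.mp hy with hy1 | hy2
    · have := pvMem_tail (c := 3) (by omega : (0:Int) ≤ (k : Int)) (by push_cast; exact hy1)
      omega
    · obtain ⟨a, b, _, _, _, _, _, _, h2, _⟩ := pvMem_flatMap (by omega) hy2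
      omega

lemma pvMain_gap {l t : List Char} (hA : pvScanAdj l = none) (h : pvScanGap l = some t) :
    (PySem.List.sorted (pvResult l) (fun x => x.length)).head? = some t := by
  have hAdj := pvScanAdj_none hA
  obtain ⟨k, hk, he, ht, hmin⟩ := pvScanGap_some h
  have hk1 : k < l.length := by omega
  have hk2 : k + 2 < l.length := hk
  have heq : l[k] = l[k + 2] := by
    rw [List.getElem?_eq_getElem hk1, List.getElem?_eq_getElem hk2] at he
    exact Option.some.inj he
  have htlen : t.length = 3 := by
    rw [ht]
    simp only [List.length_take, List.length_drop]
    omega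
  have hsplit : pvResult l = (PySem.List.pyRange 0 (k : Int) 1).flatMap (pvBlock l) ++
      (pvBlock l (k : Int) ++
        (PySem.List.pyRange ((k : Int) + 1) ((l.length : Int) - 1) 1).flatMap (pvBlock l)) := by
    unfold pvResult
    rw [PySem.List.pyRange_one_append 0 (k : Int) ((l.length : Int) - 1) (by omega) (by omega),
      PySem.List.pyRange_one_cons (by omega : (k : Int) < (l.length : Int) - 1)]
    simp [List.flatMap_append]
  have hc1 : pvCond l (k : Int) ((k : Int) + 1) = false := by
    have hs : PySem.List.slice l (some (k : Int)) (some ((k : Int) + 1)) = (l.drop k).take 1 := by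
      have := PySem.List.slice_natCast_add l k 1
      push_cast at this
      exact this
    simp only [pvCond, hs, List.length_take, List.length_drop, Bool.and_eq_false_iff]
    left
    simp only [Bool.not_eq_eq_eq_not, Bool.not_false, decide_eq_true_eq]
    omega
  have hc2 : pvCond l (k : Int) ((k : Int) + 2) = false := by
    have hs : PySem.List.slice l (some (k : Int)) (some ((k : Int) + 2)) = (l.drop k).take 2 := by
      have := PySem.List.slice_natCast_add l k 2
      push_cast at this
      exact this
    have hne : l[k] ≠ l[k + 1] := by
      have := hAdj k (by omega)
      rw [List.getElem?_eq_getElem hk1, List.getElem?_eq_getElem (by omega : k + 1 < l.length)] at this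
      exact fun hq => this (by rw [hq])
    simp only [pvCond, hs, pvTake_drop_two (by omega : k + 1 < l.length), Bool.and_eq_false_iff]
    right
    simp only [decide_eq_false_iff_not]
    simp [hne]
  have hslice3 : PySem.List.slice l (some (k : Int)) (some ((k : Int) + 3)) = (l.drop k).take 3 := by
    have := PySem.List.slice_natCast_add l k 3
    push_cast at this
    exact this
  have hc3 : pvCond l (k : Int) ((k : Int) + 3) = true := by
    simp only [pvCond, hslice3, pvTake_drop_three hk2, Bool.and_eq_true, Bool.not_eq_eq_eq_not,
      Bool.not_true, decide_eq_false_iff_not, decide_eq_true_eq]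
    constructor
    · simp
    · simp [heq]
  have hblock : pvBlock l (k : Int) = t :: pvTail l (k : Int) ((k : Int) + 4) := by
    unfold pvBlock pvTail
    rw [PySem.List.pyRange_one_cons (by omega : (k : Int) + 1 < (l.length : Int) + 1)]
    rw [show (k : Int) + 1 + 1 = (k : Int) + 2 by ring]
    rw [PySem.List.pyRange_one_cons (by omega : (k : Int) + 2 < (l.length : Int) + 1)]
    rw [show (k : Int) + 2 + 1 = (k : Int) + 3 by ring]
    rw [PySem.List.pyRange_one_cons (by omega : (k : Int) + 3 < (l.length : Int) + 1)]
    rw [show (k : Int) + 3 + 1 = (k : Int) + 4 by ring]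
    simp only [List.filter_cons, hc1, hc2, hc3]
    simp [hslice3, ← ht]
  rw [pvSorted_head, hsplit, hblock]
  simp only [List.cons_append]
  apply pvFirstMin_decomp
  · -- every palindromic slice starting before k has length > 3
    intro y hy
    obtain ⟨a, b, _, hak, hab, hbn, hshape, hlen, h2, hrev⟩ := pvMem_flatMap le_rfl hy
    rw [htlen]
    rcases Nat.lt_or_ge 3 y.length with hgt | hle
    · exact hgt
    · exfalso
      rcases Nat.eq_or_lt_of_le h2 with h2' | h3'
      · have hb2 : b = a + 2 := by omega
        have hpa : l[a]? = l[a + 1]? := pvPal_two hrev (by rw [hshape, hb2]; simp) (by omega)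
        exact hAdj a (by omega) hpa
      · have h3 : y.length = 3 := by omega
        have hb3 : b = a + 3 := by omega
        have hpa : l[a]? = l[a + 2]? := pvPal_three hrev (by rw [hshape, hb3]; simp) (by omega)
        exact hmin a (by omega) hpa
  · -- everything after t has length ≥ 3 (length 2 would be an adjacent equal pair)
    intro y hy
    rw [htlen]
    rcases List.mem_append.mp hy with hy1 | hy2
    · have := pvMem_tail (c := 4) (by omega : (0:Int) ≤ (k : Int)) (by push_cast; exact hy1)
      omega
    · obtain ⟨a, b, _, hak, hab, hbn, hshape, hlen, h2, hrev⟩ := pvMem_flatMap (by omega) hy2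
      rcases Nat.lt_or_ge 2 y.length with hgt | hle
      · omega
      · exfalso
        have h2' : y.length = 2 := by omega
        have hb2 : b = a + 2 := by omega
        have hpa : l[a]? = l[a + 1]? := pvPal_two hrev (by rw [hshape, hb2]; simp) (by omega)
        exact hAdj a (by omega) hpa

-- ===== VERDICT (by name: the statement is the Claim_ definition above) =====
theorem solution_spec : Claim_equal_solution := by
  intro s _ hPre
  unfold Spec_solution solution_alt
  rw [pvSolution_eq]
  cases hadj : pvScanAdj s.toList with
  | some t => rw [pvPyGet_zero, pvMain_adj hadj]
  | none =>
    cases hgap : pvScanGap s.toList with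
    | some t => rw [pvPyGet_zero, pvMain_gap hadj hgap]
    | none =>
      exfalso
      obtain ⟨i, hi, hcase⟩ := hPre
      rcases hcase with ⟨h2, he⟩ | ⟨h3, he⟩
      · exact pvScanAdj_none hadj i (by omega) he
      · exact pvScanGap_none hgap i (by omega) he
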